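-- pv_equiv track=rewrite | github.com/yyyhang/roman_arabic | roman_arabic.py | roman_symbols
-- ===== SOURCE A (Python) =====
-- cvert = 'MDCLXVI'
--
-- def roman_symbols(alp=cvert):
--     '''
--     To get what rule a consequence letters can represent, like {letter:value}
--     '''
--     # if alp.isalpha():
--     alpha = {}
--     temp = 1
--     alp = alp[::-1]
--     for i in range(len(alp)):
--         if i == 0:
--             alpha[alp[i]]=temp
--         elif i % 2 == 0:
--             temp = temp * 2
--             alpha[alp[i]]=temp
--         else:
--             temp = temp * 5
--             alpha[alp[i]]=temp
--     return alpha
-- ===== SOURCE B (Python) =====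
-- cvert = 'MDCLXVI'
--
-- def roman_symbols(alp=cvert):
--     '''
--     To get what rule a consequence letters can represent, like {letter:value}
--     '''
--     r = alp[::-1]
--     return {r[i]: 10 ** (i // 2) * (5 if i % 2 else 1) for i in range(len(r))}
-- ===== Notes on version B (the rewrite author's own statement) =====
-- stated objective: simpler
-- what changed: Replaces the stateful loop with a running-product accumulator `temp` by a dict comprehension whose value at each reversed index i is the independent closed form 10**(i//2) * (5 if i%2 else 1).
import Mathlib
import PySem

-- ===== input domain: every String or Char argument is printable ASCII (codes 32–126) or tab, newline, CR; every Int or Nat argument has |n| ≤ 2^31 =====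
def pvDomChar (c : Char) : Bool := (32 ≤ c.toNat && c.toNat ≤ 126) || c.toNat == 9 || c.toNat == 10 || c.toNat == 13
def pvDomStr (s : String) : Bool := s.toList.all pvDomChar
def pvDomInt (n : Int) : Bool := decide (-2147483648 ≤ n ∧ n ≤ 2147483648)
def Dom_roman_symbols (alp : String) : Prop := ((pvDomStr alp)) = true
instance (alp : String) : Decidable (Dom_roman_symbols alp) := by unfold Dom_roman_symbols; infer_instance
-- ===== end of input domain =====

-- B replaces A's running-product accumulator by a closed-form value per index (objective: simpler).

-- ===== PORT A =====
-- A: reverse alp, then loop i over range(len), maintaining temp (×5 on odd i, ×2 on even i>0).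
def roman_symbols (alp : String) : List (String × Int) :=
  let rev := alp.toList.reverse
  let st :=
    (PySem.List.pyRange 0 rev.length 1).foldl
      (fun (st : PySem.Dict String Int × Int) i =>
        let d := st.1
        let temp := st.2
        let key := String.ofList [PySem.List.pyGetD rev i ' ']
        if i == 0 then (d.insert key temp, temp)
        else if PySem.Int.mod i 2 == 0 then
          let t := temp * 2
          (d.insert key t, t)
        else
          let t := temp * 5
          (d.insert key t, t))
      (PySem.Dict.empty, 1)
  st.1.items

-- ===== PORT B =====
-- B: dict comprehension; value at reversed index i is 10^(i//2) * (5 if i%2 else 1).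
def roman_symbols_alt (alp : String) : List (String × Int) :=
  let r := alp.toList.reverse
  ((PySem.List.pyRange 0 r.length 1).foldl
      (fun (d : PySem.Dict String Int) i =>
        d.insert (String.ofList [PySem.List.pyGetD r i ' '])
          ((10 : Int) ^ (PySem.Int.floordiv i 2).toNat *
            (if PySem.Int.mod i 2 == 0 then 1 else 5)))
      PySem.Dict.empty).items

-- ===== PRECONDITION & SPEC =====
def Spec_roman_symbols (alp : String) (out : List (String × Int)) : Prop := out = roman_symbols_alt alp
instance (alp : String) (out : List (String × Int)) : Decidable (Spec_roman_symbols alp out) := by unfold Spec_roman_symbols; infer_instance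

-- ===== CLAIM (what is proved, stated in full; the proofs are below) =====
def Claim_equal_roman_symbols : Prop := ∀ (alp : String), Dom_roman_symbols alp → Spec_roman_symbols alp (roman_symbols alp)

-- ===== LEMMAS AND PROOFS =====

-- closed-form value B assigns at reversed index i
def pvClosed (i : Nat) : Int := (10 : Int) ^ (i / 2) * (if i % 2 = 0 then 1 else 5)

-- A's temp after processing indices 0..n-1
def pvTemp : Nat → Int
  | 0 => 1
  | n + 1 => pvClosed n

lemma pvClosed_succ (n : Nat) :
    pvClosed (n + 1) = pvClosed n * (if (n + 1) % 2 = 0 then 2 else 5) := by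
  rcases Nat.even_or_odd n with ⟨k, hk⟩ | ⟨k, hk⟩
  · subst hk
    have h1 : (k + k) / 2 = k := by omega
    have h2 : (k + k + 1) / 2 = k := by omega
    have h3 : (k + k) % 2 = 0 := by omega
    have h4 : (k + k + 1) % 2 = 1 := by omega
    simp [pvClosed, h1, h2, h3, h4]
  · subst hk
    have h1 : (2 * k + 1) / 2 = k := by omega
    have h2 : (2 * k + 1 + 1) / 2 = k + 1 := by omega
    have h3 : (2 * k + 1) % 2 = 1 := by omega
    have h4 : (2 * k + 1 + 1) % 2 = 0 := by omega
    simp [pvClosed, h1, h2, h3, h4, pow_succ]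
    ring

lemma pvB_val (n : Nat) :
    (10 : Int) ^ (PySem.Int.floordiv (n : Int) 2).toNat *
      (if PySem.Int.mod (n : Int) 2 == 0 then 1 else 5) = pvClosed n := by
  have hd : PySem.Int.floordiv (n : Int) 2 = ((n / 2 : Nat) : Int) := by
    exact_mod_cast PySem.Int.floordiv_natCast n 2
  have hm : PySem.Int.mod (n : Int) 2 = ((n % 2 : Nat) : Int) := by
    exact_mod_cast PySem.Int.mod_natCast n 2
  rw [hd, hm, pvClosed]
  rcases Nat.even_or_odd n with ⟨k, hk⟩ | ⟨k, hk⟩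
  · have h3 : n % 2 = 0 := by omega
    simp [h3]
    omega
  · have h3 : n % 2 = 1 := by omega
    simp [h3]
    omega

-- loop invariant: A's fold over range(n) = (B's fold over range(n), pvTemp n)
lemma pv_fold_eq (rev : List Char) (n : Nat) :
    (PySem.List.pyRange 0 n 1).foldl
      (fun (st : PySem.Dict String Int × Int) i =>
        let d := st.1
        let temp := st.2
        let key := String.ofList [PySem.List.pyGetD rev i ' ']
        if i == 0 then (d.insert key temp, temp)
        else if PySem.Int.mod i 2 == 0 then
          let t := temp * 2
          (d.insert key t, t)
        else
          let t := temp * 5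
          (d.insert key t, t))
      (PySem.Dict.empty, 1)
    = ((PySem.List.pyRange 0 n 1).foldl
        (fun (d : PySem.Dict String Int) i =>
          d.insert (String.ofList [PySem.List.pyGetD rev i ' '])
            ((10 : Int) ^ (PySem.Int.floordiv i 2).toNat *
              (if PySem.Int.mod i 2 == 0 then 1 else 5)))
        PySem.Dict.empty, pvTemp n) := by
  induction n with
  | zero => simp [PySem.List.pyRange, pvTemp]
  | succ n ih =>
    have hr : PySem.List.pyRange 0 ((n : Int) + 1) 1
        = PySem.List.pyRange 0 (n : Int) 1 ++ [(n : Int)] := by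
      exact PySem.List.pyRange_one_succ_right (by omega)
    have hcast : ((n + 1 : Nat) : Int) = (n : Int) + 1 := by push_cast; ring
    rw [hcast, hr, List.foldl_append, List.foldl_append, ih]
    simp only [List.foldl_cons, List.foldl_nil]
    rw [pvB_val n]
    cases n with
    | zero => simp [pvTemp, pvClosed]
    | succ m =>
      have hne : ((m + 1 : Nat) : Int) ≠ 0 := by positivity
      have hm : PySem.Int.mod ((m + 1 : Nat) : Int) 2 = (((m + 1) % 2 : Nat) : Int) := by
        exact_mod_cast PySem.Int.mod_natCast (m + 1) 2
      simp only [beq_iff_eq, hne, if_false, hm, pvTemp]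
      rcases Nat.even_or_odd (m + 1) with ⟨k, hk⟩ | ⟨k, hk⟩
      · have h2 : (m + 1) % 2 = 0 := by omega
        rw [pvClosed_succ]
        simp [h2]
      · have h2 : (m + 1) % 2 = 1 := by omega
        rw [pvClosed_succ]
        simp [h2]

-- ===== VERDICT (by name: the statement is the Claim_ definition above) =====
theorem roman_symbols_spec : Claim_equal_roman_symbols := by
  intro alp _
  show roman_symbols alp = roman_symbols_alt alp
  simp only [roman_symbols, roman_symbols_alt, pv_fold_eq]
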